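-- pv_equiv track=rewrite | github.com/stecman/unicode-input-panel | scripts/build-metadata.py | find_common_prefix
-- ===== SOURCE A (Python) =====
-- def find_common_prefix(a, b, min_length=3):
--     """
--     Find a common prefix in A and B that ends at a word boundary
--     """
--     if a == "" or b == "":
--         return None
--
--     i = 0
--     shortest = min(len(a), len(b))
--     while i < shortest and a[i] == b[i]:
--         i += 1
--
--     # Break at spaces (don't allow partial word prefixes)
--     word_boundary = a[:i].rfind(" ")
--
--     # Also allow breaking at hyphens
--     if word_boundary == -1:
--         word_boundary = a[:i].rfind("-")
--
--     # Include the word-boundary in the prefix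
--     word_boundary += 1
--
--     if word_boundary >= min_length:
--         return a[:word_boundary]
--     else:
--         return None
-- ===== SOURCE B (Python) =====
-- def find_common_prefix(a, b, min_length=3):
--     """
--     Find a common prefix in A and B that ends at a word boundary
--     """
--     if a == "" or b == "":
--         return None
--
--     last_space = -1
--     last_hyphen = -1
--     for i, (ca, cb) in enumerate(zip(a, b)):
--         if ca != cb:
--             break
--         if ca == ' ':
--             last_space = i
--         elif ca == '-':
--             last_hyphen = i
--
--     word_boundary = (last_space if last_space != -1 else last_hyphen) + 1
--
--     if word_boundary >= min_length:
--         return a[:word_boundary]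
--     else:
--         return None
-- ===== Notes on version B (the rewrite author's own statement) =====
-- stated objective: simpler
-- what changed: One forward pass over the zipped strings that tracks the last matched space and hyphen positions, replacing the match-length scan followed by two rfind passes over the prefix.
import Mathlib
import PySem

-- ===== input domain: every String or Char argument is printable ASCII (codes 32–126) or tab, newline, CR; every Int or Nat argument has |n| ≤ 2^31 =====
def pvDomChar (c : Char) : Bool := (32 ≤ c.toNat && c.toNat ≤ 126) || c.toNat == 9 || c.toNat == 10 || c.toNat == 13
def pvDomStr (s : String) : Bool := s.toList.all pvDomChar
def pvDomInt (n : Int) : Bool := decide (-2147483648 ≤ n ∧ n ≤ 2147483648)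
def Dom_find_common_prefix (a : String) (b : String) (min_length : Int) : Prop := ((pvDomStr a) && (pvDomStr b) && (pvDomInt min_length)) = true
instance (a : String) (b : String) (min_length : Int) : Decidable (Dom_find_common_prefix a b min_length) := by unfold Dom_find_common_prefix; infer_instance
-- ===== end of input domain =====

-- B replaces A's match-length scan plus two rfind passes over the prefix by one forward
-- pass that tracks the last matched space and hyphen positions (objective: simpler).

-- ===== PORT A =====

-- s.rfind(c) for a single character, as Python computes it: last index of c, or -1
def pvRfindAux (l : List Char) (c : Char) (i : Int) (best : Int) : Int :=
  match l with
  | [] => best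
  | x :: xs => pvRfindAux xs c (i + 1) (if x = c then i else best)

def pvRfind (l : List Char) (c : Char) : Int := pvRfindAux l c 0 (-1)

-- while i < shortest and a[i] == b[i]: i += 1
def pvALoop (la lb : List Char) (shortest i : Nat) : Nat :=
  if i < shortest ∧ PySem.List.pyGet? la (i : Int) = PySem.List.pyGet? lb (i : Int) then
    pvALoop la lb shortest (i + 1)
  else i
termination_by shortest - i
decreasing_by omega

def find_common_prefix (a : String) (b : String) (min_length : Int) : Option String :=
  if a = "" ∨ b = "" then none
  else
    let la := a.toList
    let lb := b.toList
    let shortest := min la.length lb.length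
    let i := pvALoop la lb shortest 0
    let pref := la.take i
    let wb0 := pvRfind pref ' '
    let wb1 := if wb0 = -1 then pvRfind pref '-' else wb0
    let wb := wb1 + 1
    if wb ≥ min_length then some (String.ofList (la.take wb.toNat)) else none

-- ===== PORT B =====

-- for i, (ca, cb) in enumerate(zip(a, b)): break on mismatch, track last space / hyphen
def pvBLoop (la lb : List Char) (i : Nat) (ls lh : Int) : Int × Int :=
  match la, lb with
  | ca :: as_, cb :: bs =>
    if ca ≠ cb then (ls, lh)
    else
      let ls' := if ca = ' ' then (i : Int) else ls
      let lh' := if ca = ' ' then lh else if ca = '-' then (i : Int) else lh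
      pvBLoop as_ bs (i + 1) ls' lh'
  | _, _ => (ls, lh)

def find_common_prefix_alt (a : String) (b : String) (min_length : Int) : Option String :=
  if a = "" ∨ b = "" then none
  else
    let p := pvBLoop a.toList b.toList 0 (-1) (-1)
    let wb := (if p.1 ≠ -1 then p.1 else p.2) + 1
    if wb ≥ min_length then some (String.ofList (a.toList.take wb.toNat)) else none

-- ===== PRECONDITION & SPEC =====
def Spec_find_common_prefix (a : String) (b : String) (min_length : Int) (out : Option String) : Prop := out = find_common_prefix_alt a b min_length
instance (a : String) (b : String) (min_length : Int) (out : Option String) : Decidable (Spec_find_common_prefix a b min_length out) := by unfold Spec_find_common_prefix; infer_instance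

-- ===== CLAIM (what is proved, stated in full; the proofs are below) =====
def Claim_equal_find_common_prefix : Prop := ∀ (a : String) (b : String) (min_length : Int), Dom_find_common_prefix a b min_length → Spec_find_common_prefix a b min_length (find_common_prefix a b min_length)

-- ===== LEMMAS AND PROOFS =====

-- length of the common prefix of two char lists
def matchLen : List Char → List Char → Nat
  | x :: xs, y :: ys => if x = y then matchLen xs ys + 1 else 0
  | _, _ => 0

-- index of the last occurrence of c in l
def lastIdx? (l : List Char) (c : Char) : Option Nat :=
  match l with
  | [] => none
  | x :: xs =>
    match lastIdx? xs c with
    | some j => some (j + 1)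
    | none => if x = c then some 0 else none

def optIdx (i : Nat) (d : Int) : Option Nat → Int
  | some j => (i : Int) + (j : Int)
  | none => d

lemma matchLen_nil_right (l : List Char) : matchLen l [] = 0 := by
  cases l <;> simp [matchLen]

lemma matchLen_nil_left (l : List Char) : matchLen [] l = 0 := by
  cases l <;> simp [matchLen]

lemma rfindAux_eq (l : List Char) (c : Char) : ∀ (i best : Int),
    pvRfindAux l c i best = optIdx 0 best (lastIdx? l c) + (match lastIdx? l c with | some _ => i | none => 0) := by
  induction l with
  | nil => intro i best; simp [pvRfindAux, lastIdx?, optIdx]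
  | cons x xs ih =>
    intro i best
    simp only [pvRfindAux, lastIdx?]
    rw [ih]
    cases h : lastIdx? xs c with
    | some j => simp [optIdx]; ring
    | none =>
      by_cases hx : x = c <;> simp [hx, optIdx]

lemma rfind_eq (l : List Char) (c : Char) :
    pvRfind l c = optIdx 0 (-1) (lastIdx? l c) := by
  rw [pvRfind, rfindAux_eq]
  cases lastIdx? l c <;> simp [optIdx]

lemma aLoop_eq (n : Nat) : ∀ (la lb : List Char) (i : Nat),
    min la.length lb.length - i ≤ n →
    pvALoop la lb (min la.length lb.length) i = i + matchLen (la.drop i) (lb.drop i) := by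
  induction n with
  | zero =>
    intro la lb i h
    have hge : min la.length lb.length ≤ i := by omega
    rw [pvALoop]
    rw [if_neg (by omega)]
    rcases min_le_iff.mp (le_refl (min la.length lb.length)) with h1 | h1
    · rw [List.drop_eq_nil_of_le (by omega), matchLen_nil_left]; omega
    · rw [List.drop_eq_nil_of_le (as := lb) (by omega), matchLen_nil_right]; omega
  | succ n ih =>
    intro la lb i h
    rw [pvALoop]
    by_cases hlt : i < min la.length lb.length
    · have hia : i < la.length := by omega
      have hib : i < lb.length := by omega
      have ga : PySem.List.pyGet? la (i : Int) = some la[i] := by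
        rw [PySem.List.pyGet?_natCast]; simp [hia]
      have gb : PySem.List.pyGet? lb (i : Int) = some lb[i] := by
        rw [PySem.List.pyGet?_natCast]; simp [hib]
      rw [List.drop_eq_getElem_cons hia, List.drop_eq_getElem_cons hib]
      by_cases heq : la[i] = lb[i]
      · rw [if_pos ⟨hlt, by rw [ga, gb, heq]⟩]
        rw [ih la lb (i + 1) (by omega)]
        simp [matchLen, heq]
        omega
      · rw [if_neg (by rw [ga, gb]; simp [heq, hlt])]
        simp [matchLen, heq]
    · rw [if_neg (by omega)]
      rcases min_le_iff.mp (by omega : min la.length lb.length ≤ i) with h1 | h1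
      · rw [List.drop_eq_nil_of_le (by omega), matchLen_nil_left]; omega
      · rw [List.drop_eq_nil_of_le (as := lb) (by omega), matchLen_nil_right]; omega

lemma bLoop_eq : ∀ (la lb : List Char) (i : Nat) (ls lh : Int),
    pvBLoop la lb i ls lh =
      (optIdx i ls (lastIdx? (la.take (matchLen la lb)) ' '),
       optIdx i lh (lastIdx? (la.take (matchLen la lb)) '-')) := by
  intro la
  induction la with
  | nil => intro lb i ls lh; cases lb <;> simp [pvBLoop, matchLen, lastIdx?, optIdx]
  | cons ca as_ ih =>
    intro lb i ls lh
    cases lb with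
    | nil => simp [pvBLoop, matchLen_nil_right, lastIdx?, optIdx]
    | cons cb bs =>
      by_cases hc : ca = cb
      · subst hc
        simp only [pvBLoop, ne_eq, not_true_eq_false, if_false]
        rw [ih]
        simp only [matchLen, if_true, List.take_succ_cons, lastIdx?, Prod.mk.injEq]
        constructor
        · cases h : lastIdx? (as_.take (matchLen as_ bs)) ' ' with
          | some j => simp [optIdx]; ring
          | none => by_cases hs : ca = ' ' <;> simp [hs, optIdx]
        · cases h : lastIdx? (as_.take (matchLen as_ bs)) '-' with
          | some j => simp [optIdx]; ring
          | none =>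
            by_cases hs : ca = ' '
            · simp [hs, optIdx]
            · by_cases hh : ca = '-' <;> simp [hs, hh, optIdx]
      · simp [pvBLoop, hc, matchLen, lastIdx?, optIdx]

-- ===== VERDICT (by name: the statement is the Claim_ definition above) =====
theorem find_common_prefix_spec : Claim_equal_find_common_prefix := by
  intro a b min_length _
  unfold Spec_find_common_prefix find_common_prefix find_common_prefix_alt
  by_cases hemp : a = "" ∨ b = ""
  · simp [hemp]
  · simp only [hemp, if_false]
    have hA := aLoop_eq (min a.toList.length b.toList.length) a.toList b.toList 0 (by omega)
    simp only [List.drop_zero, Nat.zero_add] at hA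
    have hB := bLoop_eq a.toList b.toList 0 (-1) (-1)
    simp only [hA, hB]
    set P := a.toList.take (matchLen a.toList b.toList) with hP
    cases hs : lastIdx? P ' ' with
    | some j =>
      simp [rfind_eq, hs, optIdx]
    | none =>
      cases hh : lastIdx? P '-' with
      | some j => simp [rfind_eq, hs, hh, optIdx]
      | none => simp [rfind_eq, hs, hh, optIdx]
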